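-- pv_equiv track=rewrite | github.com/nissmogt/sequence_degradation | get_region.py | get_lowercase_index
-- ===== SOURCE A (Python) =====
-- def get_lowercase_index(template_sequence):
--     """
--     Finds index for lowercase characters in any sequence.
--     :param template_sequence:
--     :return:
--     """
--     idx = []
--     lower_idx = []
--     count = 0
--     for i, ch in enumerate(template_sequence):
--         if not ch.islower():
--             count += 1
--             idx.append(count)
--         else:
--             lower_idx.append(i)
--
--     return idx, lower_idx
-- ===== SOURCE B (Python) =====
-- def get_lowercase_index(template_sequence):
--     """Same result as A: idx is just 1..k for k = number of non-lowercase chars,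
--     so collect the lowercase positions in one pass and build idx as a range."""
--     total = 0
--     lower_idx = []
--     for i, ch in enumerate(template_sequence):
--         total += 1
--         if ch.islower():
--             lower_idx.append(i)
--     idx = list(range(1, total - len(lower_idx) + 1))
--     return idx, lower_idx
-- ===== Notes on version B (the rewrite author's own statement) =====
-- stated objective: simpler
-- what changed: B drops A's running counter and idx-append branch: it only collects lowercase positions (counting elements in the same pass) and constructs idx as the closed-form range(1, total - len(lower_idx) + 1).
import Mathlib
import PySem

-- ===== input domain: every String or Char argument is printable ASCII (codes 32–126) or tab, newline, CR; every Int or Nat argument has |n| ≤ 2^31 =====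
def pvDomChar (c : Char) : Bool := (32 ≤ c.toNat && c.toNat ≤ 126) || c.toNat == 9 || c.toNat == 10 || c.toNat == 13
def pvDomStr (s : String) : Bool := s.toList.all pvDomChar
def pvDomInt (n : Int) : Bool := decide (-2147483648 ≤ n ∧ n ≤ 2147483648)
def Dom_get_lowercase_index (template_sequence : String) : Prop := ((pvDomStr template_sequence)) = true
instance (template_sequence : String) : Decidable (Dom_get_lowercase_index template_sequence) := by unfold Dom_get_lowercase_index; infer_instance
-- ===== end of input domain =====

-- ===== PORT A =====
-- B changes only idx's construction (closed-form range instead of a running counter); equivalence on all strings.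
-- loop body of A, as in the Python: non-lowercase -> bump count and append it to idx; lowercase -> append i to lower_idx
def pvStepA (acc : List Int × List Int × Int) (p : Int × Char) : List Int × List Int × Int :=
  if !(PySem.Chars.islower p.2) then (acc.1 ++ [acc.2.2 + 1], acc.2.1, acc.2.2 + 1)
  else (acc.1, acc.2.1 ++ [p.1], acc.2.2)

def get_lowercase_index (template_sequence : String) : List Int × List Int :=
  let r := (PySem.List.enumerate template_sequence.toList).foldl pvStepA ([], [], 0)
  (r.1, r.2.1)

-- ===== PORT B =====
-- loop body of B: count the element; collect its index if lowercase
def pvStepB (acc : Int × List Int) (p : Int × Char) : Int × List Int :=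
  (acc.1 + 1, if PySem.Chars.islower p.2 then acc.2 ++ [p.1] else acc.2)

def get_lowercase_index_alt (template_sequence : String) : List Int × List Int :=
  let r := (PySem.List.enumerate template_sequence.toList).foldl pvStepB (0, [])
  (PySem.List.pyRange 1 (r.1 - (r.2.length : Int) + 1) 1, r.2)

-- ===== PRECONDITION & SPEC =====
def Spec_get_lowercase_index (template_sequence : String) (out : List Int × List Int) : Prop := out = get_lowercase_index_alt template_sequence
instance (template_sequence : String) (out : List Int × List Int) : Decidable (Spec_get_lowercase_index template_sequence out) := by unfold Spec_get_lowercase_index; infer_instance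

-- ===== CLAIM (what is proved, stated in full; the proofs are below) =====
def Claim_equal_get_lowercase_index : Prop := ∀ (template_sequence : String), Dom_get_lowercase_index template_sequence → Spec_get_lowercase_index template_sequence (get_lowercase_index template_sequence)

-- ===== LEMMAS AND PROOFS =====

def pvLowers (l : List (Int × Char)) : List Int :=
  (l.filter (fun p => PySem.Chars.islower p.2)).map (·.1)

def pvRangeFrom (c : Int) (k : Nat) : List Int :=
  (List.range k).map (fun j : Nat => c + 1 + (j : Int))

theorem pvStepA_low {p : Int × Char} (acc : List Int × List Int × Int)
    (h : PySem.Chars.islower p.2 = true) :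
    pvStepA acc p = (acc.1, acc.2.1 ++ [p.1], acc.2.2) := by
  simp [pvStepA, h]

theorem pvStepA_up {p : Int × Char} (acc : List Int × List Int × Int)
    (h : ¬ PySem.Chars.islower p.2 = true) :
    pvStepA acc p = (acc.1 ++ [acc.2.2 + 1], acc.2.1, acc.2.2 + 1) := by
  simp [pvStepA, h]

theorem pvRangeFrom_succ (c : Int) (k : Nat) :
    pvRangeFrom c (k + 1) = (c + 1) :: pvRangeFrom (c + 1) k := by
  rw [pvRangeFrom, List.range_succ_eq_map, List.map_cons, List.map_map]
  rw [pvRangeFrom]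
  congr 1
  · norm_num
  · refine List.map_congr_left ?_
    intro j _
    simp [Function.comp]
    ring

theorem pvFoldA (l : List (Int × Char)) : ∀ (idx low : List Int) (c : Int),
    l.foldl pvStepA (idx, low, c)
    = (idx ++ pvRangeFrom c (l.countP (fun p => !PySem.Chars.islower p.2)),
       low ++ pvLowers l,
       c + (l.countP (fun p => !PySem.Chars.islower p.2) : Int)) := by
  induction l with
  | nil => intro idx low c; simp [pvRangeFrom, pvLowers]
  | cons p t ih =>
    intro idx low c
    rw [List.foldl_cons]
    by_cases h : PySem.Chars.islower p.2 = true
    · rw [pvStepA_low _ h, ih]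
      simp [pvLowers, h]
    · rw [pvStepA_up _ h, ih]
      simp [pvLowers, h, pvRangeFrom_succ, Prod.mk.injEq, List.append_assoc]
      all_goals omega

theorem pvFoldB (l : List (Int × Char)) : ∀ (c : Int) (low : List Int),
    l.foldl pvStepB (c, low) = (c + (l.length : Int), low ++ pvLowers l) := by
  induction l with
  | nil => intro c low; simp [pvLowers]
  | cons p t ih =>
    intro c low
    rw [List.foldl_cons]
    by_cases h : PySem.Chars.islower p.2 = true
    · rw [show pvStepB (c, low) p = (c + 1, low ++ [p.1]) from by simp [pvStepB, h], ih]
      simp [Prod.mk.injEq, pvLowers, h, List.append_assoc]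
      all_goals omega
    · rw [show pvStepB (c, low) p = (c + 1, low) from by simp [pvStepB, h], ih]
      simp [Prod.mk.injEq, pvLowers, h]
      all_goals omega

theorem pvRangeFrom_eq_pyRange (k : Nat) :
    pvRangeFrom 0 k = PySem.List.pyRange 1 ((k : Int) + 1) 1 := by
  rw [PySem.List.pyRange_one]
  have h : (((k : Int) + 1) - 1).toNat = k := by omega
  rw [h, pvRangeFrom]
  refine List.map_congr_left ?_
  intro j _
  ring

theorem pvCount (l : List (Int × Char)) :
    l.countP (fun p => PySem.Chars.islower p.2)
      + l.countP (fun p => !PySem.Chars.islower p.2) = l.length := by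
  induction l with
  | nil => rfl
  | cons p t ih =>
    by_cases h : PySem.Chars.islower p.2 = true <;>
      simp [h] <;> omega

-- ===== VERDICT (by name: the statement is the Claim_ definition above) =====
theorem get_lowercase_index_spec : Claim_equal_get_lowercase_index := by
  intro s _
  unfold Spec_get_lowercase_index get_lowercase_index get_lowercase_index_alt
  rw [pvFoldA, pvFoldB]
  simp only [List.nil_append]
  have hlen := pvCount (PySem.List.enumerate s.toList)
  have hlow : (pvLowers (PySem.List.enumerate s.toList)).length
      = (PySem.List.enumerate s.toList).countP (fun p => PySem.Chars.islower p.2) := by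
    simp [pvLowers, List.countP_eq_length_filter]
  refine Prod.ext ?_ rfl
  simp only
  rw [hlow, pvRangeFrom_eq_pyRange]
  congr 1
  omega
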